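-- pv_equiv track=rewrite | github.com/DemDem38/FrenchMeiChan | src/noyau_fonctionnel/scenario/Scenario.py | depouperCond
-- ===== SOURCE A (Python) =====
-- def depouperCond(string) :
--     if (string == None) :
--         return None
--     listCond = []
--     Cond = []
--     mot = ''
--     for char in string :
--         if char == ',' :
--             Cond.append(mot)
--             mot = ''
--         elif char == ';' :
--             Cond.append(mot)
--             listCond.append(Cond)
--             Cond = []
--             mot = ''
--         elif char != ' ' :
--             mot += char
--     Cond.append(mot)
--     listCond.append(Cond)
--     return listCond
-- ===== SOURCE B (Python) =====
-- def depouperCond(string):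
--     if string is None:
--         return None
--     cleaned = string.replace(' ', '')
--     return [group.split(',') for group in cleaned.split(';')]
-- ===== Notes on version B (the rewrite author's own statement) =====
-- stated objective: faster
-- what changed: Replaces A's character-by-character accumulator loop with manual delimiter branches by the idiomatic string pipeline: strip spaces with str.replace, split on semicolons into groups, then split each group on commas (C-level str methods instead of a per-character Python loop).
import Mathlib
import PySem

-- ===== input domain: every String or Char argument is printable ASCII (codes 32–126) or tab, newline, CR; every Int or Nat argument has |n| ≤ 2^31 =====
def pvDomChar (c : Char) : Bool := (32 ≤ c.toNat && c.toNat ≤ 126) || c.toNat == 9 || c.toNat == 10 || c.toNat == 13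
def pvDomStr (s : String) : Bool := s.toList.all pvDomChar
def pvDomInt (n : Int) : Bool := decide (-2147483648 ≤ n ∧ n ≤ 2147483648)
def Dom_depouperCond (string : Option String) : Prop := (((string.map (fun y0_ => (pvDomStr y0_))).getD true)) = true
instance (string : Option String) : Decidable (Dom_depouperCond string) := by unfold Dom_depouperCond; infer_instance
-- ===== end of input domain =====

-- B replaces A's per-character accumulator loop by str.replace + nested splits on the two delimiters (same O(n), measurably faster via C-level string methods).

-- ===== PORT A =====
-- A's loop over the characters with state (listCond, Cond, mot); strings handled as char lists.
def depouperCondLoop : List Char → List (List (List Char)) → List (List Char) → List Char →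
    List (List (List Char)) × List (List Char) × List Char
  | [], listCond, cond, mot => (listCond, cond, mot)
  | ch :: rest, listCond, cond, mot =>
      if ch = ',' then depouperCondLoop rest listCond (cond ++ [mot]) []
      else if ch = ';' then depouperCondLoop rest (listCond ++ [cond ++ [mot]]) [] []
      else if ch ≠ ' ' then depouperCondLoop rest listCond cond (mot ++ [ch])
      else depouperCondLoop rest listCond cond mot

def depouperCond (string : Option String) : Option (List (List String)) :=
  match string with
  | none => none
  | some s =>
      let r := depouperCondLoop s.toList [] [] []
      some ((r.1 ++ [r.2.1 ++ [r.2.2]]).map (fun c => c.map String.ofList))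

-- ===== PORT B =====
def depouperCond_alt (string : Option String) : Option (List (List String)) :=
  match string with
  | none => none
  | some s =>
      let cleaned := PySem.Chars.replace s.toList [' '] []
      some ((PySem.Chars.splitOn cleaned [';']).map
        (fun group => (PySem.Chars.splitOn group [',']).map String.ofList))

-- ===== PRECONDITION & SPEC =====
def Spec_depouperCond (string : Option String) (out : Option (List (List String))) : Prop := out = depouperCond_alt string
instance (string : Option String) (out : Option (List (List String))) : Decidable (Spec_depouperCond string out) := by unfold Spec_depouperCond; infer_instance

-- ===== CLAIM (what is proved, stated in full; the proofs are below) =====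
def Claim_equal_depouperCond : Prop := ∀ (string : Option String), Dom_depouperCond string → Spec_depouperCond string (depouperCond string)

-- ===== LEMMAS AND PROOFS =====

-- replace(' ','') is filtering out spaces
theorem replaceGo_space (l : List Char) : ∀ (fuel : Nat) (acc : List Char), l.length ≤ fuel →
    PySem.Chars.replace.go [' '] [] fuel l acc = acc.reverse ++ l.filter (fun c => c ≠ ' ') := by
  induction l with
  | nil =>
      intro fuel acc _
      cases fuel <;> simp [PySem.Chars.replace.go]
  | cons c t ih =>
      intro fuel acc h
      cases fuel with
      | zero => simp at h
      | succ n =>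
        simp only [PySem.Chars.replace.go, List.isPrefixOf]
        by_cases hc : c = ' '
        · simp [hc, ih n acc (by simpa using h)]
        · simp only [Bool.and_true, beq_iff_eq, if_neg (Ne.symm hc)]
          rw [ih n (c :: acc) (by simpa using Nat.le_of_succ_le_succ h)]
          simp [hc]

theorem replace_space (l : List Char) :
    PySem.Chars.replace l [' '] [] = l.filter (fun c => c ≠ ' ') := by
  simp [PySem.Chars.replace, replaceGo_space l l.length [] (le_refl _)]

-- splitting on a one-character separator is List.splitOn
theorem splitOnGo_single (d : Char) (l : List Char) : ∀ (fuel : Nat) (cur : List Char) (acc : List (List Char)),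
    l.length < fuel →
    PySem.Chars.splitOn.go [d] fuel l cur acc
      = acc.reverse ++ List.modifyHead (fun g => cur.reverse ++ g) (l.splitOn d) := by
  induction l with
  | nil =>
      intro fuel cur acc h
      cases fuel with
      | zero => omega
      | succ n => simp [PySem.Chars.splitOn.go, List.splitOn, List.splitOnP_nil]
  | cons c t ih =>
      intro fuel cur acc h
      cases fuel with
      | zero => omega
      | succ n =>
        simp only [PySem.Chars.splitOn.go, List.isPrefixOf]
        by_cases hc : c = d
        · simp only [Bool.and_true, beq_iff_eq, if_pos hc.symm]
          rw [show List.drop [d].length (c :: t) = t from rfl]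
          rw [ih n [] (cur.reverse :: acc) (by simpa using h)]
          simp only [List.splitOn, List.splitOnP_cons, hc, beq_self_eq_true, if_pos]
          cases t.splitOnP (fun x => x == d) <;> simp
        · simp only [Bool.and_true, beq_iff_eq, if_neg (Ne.symm hc)]
          rw [ih n (c :: cur) acc (by simpa using Nat.lt_of_succ_lt_succ h)]
          simp only [List.splitOn, List.splitOnP_cons, beq_iff_eq, if_neg hc]
          cases t.splitOnP (fun x => x == d) <;> simp
  
theorem splitOn_single (d : Char) (l : List Char) :
    PySem.Chars.splitOn l [d] = l.splitOn d := by
  rw [PySem.Chars.splitOn, splitOnGo_single d l (l.length + 1) [] [] (by omega)]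
  cases h : l.splitOn d <;> simp

-- the common specification: groups of words of a space-free char list
def condSpec : List Char → List (List (List Char))
  | [] => [[[]]]
  | c :: t =>
      if c = ';' then [[]] :: condSpec t
      else if c = ',' then List.modifyHead (fun g => [] :: g) (condSpec t)
      else List.modifyHead (List.modifyHead (fun w => c :: w)) (condSpec t)

theorem condSpec_ne_nil (l : List Char) : condSpec l ≠ [] := by
  cases l with
  | nil => simp [condSpec]
  | cons c t =>
      have ht := condSpec_ne_nil t
      simp only [condSpec]
      split_ifs <;> cases h : condSpec t <;> simp_all

theorem splitOn_eq_condSpec (l : List Char) :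
    (l.splitOn ';').map (fun g => g.splitOn ',') = condSpec l := by
  induction l with
  | nil => simp [List.splitOn, List.splitOnP_nil, condSpec]
  | cons c t ih =>
      simp only [List.splitOn] at ih ⊢
      obtain ⟨g, gs, hgs⟩ := List.exists_cons_of_ne_nil (List.splitOnP_ne_nil (fun x => x == ';') t)
      rw [List.splitOnP_cons]
      simp only [condSpec]
      by_cases h1 : c = ';'
      · subst h1
        simp [List.splitOnP_nil, ← ih]
      · rw [if_neg (by simp [h1]), if_neg h1]
        rw [hgs] at ih ⊢
        by_cases h2 : c = ','
        · subst h2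
          rw [if_pos rfl, List.modifyHead_cons, List.map_cons, List.splitOnP_cons, if_pos (by simp)]
          rw [List.map_cons] at ih
          rw [← ih, List.modifyHead_cons]
        · rw [if_neg h2, List.modifyHead_cons, List.map_cons, List.splitOnP_cons, if_neg (by simp [h2])]
          rw [List.map_cons] at ih
          rw [← ih, List.modifyHead_cons]

-- A's loop skips spaces: processing l equals processing l with spaces removed
theorem depouperCondLoop_filter (l : List Char) : ∀ L C m,
    depouperCondLoop l L C m = depouperCondLoop (l.filter (fun c => c ≠ ' ')) L C m := by
  induction l with
  | nil => intro L C m; simp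
  | cons c t ih =>
      intro L C m
      by_cases hc : c = ' '
      · subst hc
        simp [depouperCondLoop, ih]
      · rw [List.filter_cons, if_pos (by simpa using hc)]
        simp only [depouperCondLoop]
        split_ifs <;> apply ih

-- characterisation of A's loop on a space-free list
theorem depouperCondLoop_spec (l : List Char) (hl : ∀ c ∈ l, c ≠ ' ') : ∀ L C m,
    (fun r => r.1 ++ [r.2.1 ++ [r.2.2]]) (depouperCondLoop l L C m)
      = L ++ List.modifyHead (fun g => C ++ List.modifyHead (fun w => m ++ w) g) (condSpec l) := by
  induction l with
  | nil => intro L C m; simp [depouperCondLoop, condSpec]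
  | cons c t ih =>
      intro L C m
      have hl' : ∀ c ∈ t, c ≠ ' ' := fun x hx => hl x (List.mem_cons_of_mem _ hx)
      have hc : c ≠ ' ' := hl c (List.mem_cons_self ..)
      by_cases h1 : c = ','
      · subst h1
        rw [show depouperCondLoop (','::t) L C m = depouperCondLoop t L (C ++ [m]) [] from by
              simp [depouperCondLoop],
            ih hl' L (C ++ [m]) [],
            show condSpec (','::t) = List.modifyHead (fun g => [] :: g) (condSpec t) from by
              simp [condSpec]]
        cases hs : condSpec t with
        | nil => exact absurd hs (condSpec_ne_nil t)
        | cons g gs => cases g <;> simp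
      · by_cases h2 : c = ';'
        · subst h2
          rw [show depouperCondLoop (';'::t) L C m = depouperCondLoop t (L ++ [C ++ [m]]) [] [] from by
                simp [depouperCondLoop],
              ih hl' (L ++ [C ++ [m]]) [] [],
              show condSpec (';'::t) = [[]] :: condSpec t from by simp [condSpec]]
          cases hs : condSpec t with
          | nil => exact absurd hs (condSpec_ne_nil t)
          | cons g gs => cases g <;> simp
        · rw [show depouperCondLoop (c::t) L C m = depouperCondLoop t L C (m ++ [c]) from by
                simp [depouperCondLoop, h1, h2, hc],
              ih hl' L C (m ++ [c]),
              show condSpec (c::t) = List.modifyHead (List.modifyHead (fun w => c :: w)) (condSpec t) from by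
                simp [condSpec, h1, h2]]
          cases hs : condSpec t with
          | nil => exact absurd hs (condSpec_ne_nil t)
          | cons g gs => cases g <;> simp

-- ===== VERDICT (by name: the statement is the Claim_ definition above) =====
theorem depouperCond_spec : Claim_equal_depouperCond := by
  intro string _
  unfold Spec_depouperCond depouperCond depouperCond_alt
  cases string with
  | none => rfl
  | some s =>
      simp only [replace_space, splitOn_single]
      rw [depouperCondLoop_filter]
      have hfree : ∀ c ∈ s.toList.filter (fun c => c ≠ ' '), c ≠ ' ' := by
        intro c hc
        simpa using (List.of_mem_filter hc)
      have h := depouperCondLoop_spec (s.toList.filter (fun c => c ≠ ' ')) hfree [] [] []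
      simp only [List.nil_append] at h
      rw [h, ← splitOn_eq_condSpec]
      have hid : ∀ (x : List (List Char)), List.modifyHead (fun w => w) x = x := by
        intro x; cases x <;> rfl
      cases hs : (s.toList.filter (fun c => c ≠ ' ')).splitOn ';' with
      | nil => simp
      | cons g gs => simp [hid]
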